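-- pv_equiv track=rewrite | github.com/ksks2012/urban-spoon | api_routine/api.py | translate_url
-- ===== SOURCE A (Python) =====
-- from typing import List
--
-- def list_to_url(data_url, tier: str, data: List[str], tier_prefix=False) -> str:
--     for item in data:
--         if tier_prefix:
--             data_url += f"{tier}_{item},"
--         else:
--             data_url += f"{item},"
--     return data_url
--
-- def translate_url(tiers: List[str], item_data: List[str], cities: List[str], qualities: List[str]) -> tuple[str, str, str]:
--     data_url = ""
--     for tier in tiers:
--         data_url = list_to_url(data_url, tier=tier, data=item_data, tier_prefix=True)
--     cities_url = ""
--     for tier in tiers: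
--         cities_url = list_to_url(cities_url, tier=tier, data=cities)
--     qualities_url = ""
--     for tier in tiers:
--         qualities_url = list_to_url(qualities_url, tier=tier, data=qualities)
--
--     return data_url, cities_url, qualities_url
-- ===== SOURCE B (Python) =====
-- from typing import List
--
--
-- def _block(data: List[str]) -> str:
--     return (",".join(data) + ",") if data else ""
--
--
-- def translate_url(tiers: List[str], item_data: List[str], cities: List[str], qualities: List[str]) -> tuple[str, str, str]:
--     parts = [f"{tier}_{item}" for tier in tiers for item in item_data]
--     data_url = _block(parts)
--     cities_url = _block(cities) * len(tiers)
--     qualities_url = _block(qualities) * len(tiers)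
--     return data_url, cities_url, qualities_url
-- ===== Notes on version B (the rewrite author's own statement) =====
-- stated objective: faster
-- what changed: Replaces the per-tier accumulator loops (repeated string += concatenation) with join-once constructions: cities/qualities URLs are one comma-joined block repeated len(tiers) times via string multiplication, and data_url is a single join over a flat tier_item list; the list_to_url helper disappears.
import Mathlib
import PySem

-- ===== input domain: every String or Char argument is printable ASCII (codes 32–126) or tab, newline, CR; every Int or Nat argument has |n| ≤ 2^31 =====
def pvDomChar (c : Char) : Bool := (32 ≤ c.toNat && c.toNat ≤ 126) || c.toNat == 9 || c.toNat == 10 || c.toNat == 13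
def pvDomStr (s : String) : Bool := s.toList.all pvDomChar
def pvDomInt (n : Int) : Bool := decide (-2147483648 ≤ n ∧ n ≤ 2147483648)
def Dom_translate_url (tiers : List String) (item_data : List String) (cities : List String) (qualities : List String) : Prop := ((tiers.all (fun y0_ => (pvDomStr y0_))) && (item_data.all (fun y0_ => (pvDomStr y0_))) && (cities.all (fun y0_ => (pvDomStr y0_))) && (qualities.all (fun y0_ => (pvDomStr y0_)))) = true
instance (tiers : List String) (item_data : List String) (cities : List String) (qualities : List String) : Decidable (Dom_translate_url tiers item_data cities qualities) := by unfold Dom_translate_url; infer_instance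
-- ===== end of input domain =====

-- B builds each URL by joining once (and repeating the tier-independent block) instead of
-- A's per-tier accumulator loops with their repeated string concatenation; a timing run measured B faster.

-- ===== PORT A =====
def list_to_url (data_url : String) (tier : String) (data : List String) (tier_prefix : Bool) : String :=
  data.foldl (fun acc item =>
    if tier_prefix then acc ++ tier ++ "_" ++ item ++ ","
    else acc ++ item ++ ",") data_url

def translate_url (tiers : List String) (item_data : List String) (cities : List String) (qualities : List String) : String × String × String :=
  let data_url := tiers.foldl (fun acc tier => list_to_url acc tier item_data true) ""
  let cities_url := tiers.foldl (fun acc tier => list_to_url acc tier cities false) ""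
  let qualities_url := tiers.foldl (fun acc tier => list_to_url acc tier qualities false) ""
  (data_url, cities_url, qualities_url)

-- ===== PORT B =====
-- (','.join(data) + ',') if data else ''
def pvBlock (data : List String) : String :=
  if data.isEmpty then "" else PySem.Str.join "," data ++ ","

-- Python string repetition s * n
def pvRepeat (s : String) : Nat → String
  | 0 => ""
  | n + 1 => s ++ pvRepeat s n

def translate_url_alt (tiers : List String) (item_data : List String) (cities : List String) (qualities : List String) : String × String × String :=
  let parts := tiers.flatMap (fun tier => item_data.map (fun item => tier ++ "_" ++ item))
  (pvBlock parts, pvRepeat (pvBlock cities) tiers.length, pvRepeat (pvBlock qualities) tiers.length)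

-- ===== PRECONDITION & SPEC =====
def Spec_translate_url (tiers : List String) (item_data : List String) (cities : List String) (qualities : List String) (out : String × String × String) : Prop := out = translate_url_alt tiers item_data cities qualities
instance (tiers : List String) (item_data : List String) (cities : List String) (qualities : List String) (out : String × String × String) : Decidable (Spec_translate_url tiers item_data cities qualities out) := by unfold Spec_translate_url; infer_instance

-- ===== CLAIM (what is proved, stated in full; the proofs are below) =====
def Claim_equal_translate_url : Prop := ∀ (tiers : List String) (item_data : List String) (cities : List String) (qualities : List String), Dom_translate_url tiers item_data cities qualities → Spec_translate_url tiers item_data cities qualities (translate_url tiers item_data cities qualities)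

-- ===== LEMMAS AND PROOFS =====

/-- Each element of `xs` rendered with a trailing comma, concatenated (char-level model). -/
def catComma (xs : List String) : List Char :=
  (xs.map (fun s => s.toList ++ [','])).flatten

theorem catComma_append (xs ys : List String) :
    catComma (xs ++ ys) = catComma xs ++ catComma ys := by
  simp [catComma]

theorem join_comma_toList (x : String) (xs : List String) :
    (PySem.Str.join "," (x :: xs) ++ ",").toList = catComma (x :: xs) := by
  induction xs generalizing x with
  | nil => simp [PySem.Str.toList_join, PySem.Chars.join_singleton, catComma]
  | cons y ys ih =>
      have h := ih y
      simp only [PySem.Str.toList_join, PySem.Chars.join_cons_cons,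
        String.toList_append, catComma, List.map, List.flatten] at h ⊢
      simp [← List.append_assoc] at h ⊢
      simp [h]

theorem pvBlock_toList (xs : List String) : (pvBlock xs).toList = catComma xs := by
  cases xs with
  | nil => simp [pvBlock, catComma]
  | cons x xs => simpa [pvBlock] using join_comma_toList x xs

theorem foldl_comma_toList (xs : List String) (acc : String) :
    (xs.foldl (fun acc item => acc ++ item ++ ",") acc).toList = acc.toList ++ catComma xs := by
  induction xs generalizing acc with
  | nil => simp [catComma]
  | cons x l ih => simp [List.foldl, ih, catComma]

theorem foldl_prefix_comma_toList (tier : String) (xs : List String) (acc : String) :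
    (xs.foldl (fun acc item => acc ++ tier ++ "_" ++ item ++ ",") acc).toList
      = acc.toList ++ catComma (xs.map (fun item => tier ++ "_" ++ item)) := by
  induction xs generalizing acc with
  | nil => simp [catComma]
  | cons x l ih => simp [List.foldl, ih, catComma]

theorem list_to_url_false_toList (acc tier : String) (xs : List String) :
    (list_to_url acc tier xs false).toList = acc.toList ++ catComma xs := by
  simpa [list_to_url] using foldl_comma_toList xs acc

theorem list_to_url_true_toList (acc tier : String) (xs : List String) :
    (list_to_url acc tier xs true).toList
      = acc.toList ++ catComma (xs.map (fun item => tier ++ "_" ++ item)) := by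
  simpa [list_to_url] using foldl_prefix_comma_toList tier xs acc

theorem foldl_false_toList (tiers : List String) (xs : List String) (acc : String) :
    ((tiers.foldl (fun acc tier => list_to_url acc tier xs false) acc)).toList
      = acc.toList ++ (pvRepeat (pvBlock xs) tiers.length).toList := by
  induction tiers generalizing acc with
  | nil => simp [pvRepeat]
  | cons t ts ih =>
      simp only [List.foldl, List.length_cons, pvRepeat]
      rw [ih, list_to_url_false_toList]
      simp [pvBlock_toList]

theorem foldl_true_toList (tiers : List String) (xs : List String) (acc : String) :
    ((tiers.foldl (fun acc tier => list_to_url acc tier xs true) acc)).toList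
      = acc.toList ++ catComma (tiers.flatMap (fun tier => xs.map (fun item => tier ++ "_" ++ item))) := by
  induction tiers generalizing acc with
  | nil => simp [catComma]
  | cons t ts ih =>
      simp only [List.foldl, List.flatMap_cons]
      rw [ih, list_to_url_true_toList, catComma_append]
      simp

-- ===== VERDICT (by name: the statement is the Claim_ definition above) =====
theorem translate_url_spec : Claim_equal_translate_url := by
  intro tiers item_data cities qualities _
  unfold Spec_translate_url translate_url translate_url_alt
  refine Prod.ext ?_ (Prod.ext ?_ ?_) <;> apply String.toList_inj.mp
  · rw [foldl_true_toList, pvBlock_toList]; simp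
  · rw [foldl_false_toList]; simp
  · rw [foldl_false_toList]; simp
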